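-- pv_equiv track=rewrite | github.com/chhsinnovation/ca_covid_county_spiders | ca_covid_county_spiders/utils/covid.py | dataHasCovid
-- ===== SOURCE A (Python) =====
-- keywords = [
--     'COVID-19',
--     'COVID19',
--     'COVID',
--     'covid-19',
--     'covid19',
--     'covid',
--     'coronavirus',
--     'corona virus',
--     'corona',
--     'SARS-CoV-2',
--     'SARSCov2',
--     'SARS CoV 2',
--     'social distancing',
--     'distancing',
--     'community spread',
--     'isolation',
--     'shelter at home',
--     'shelter in place',
--     'shelter',
--     'CDC',
--     'CDPH',
--     'gatherings',
--     'public health emergency',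
--     'stay home',
-- ]
--
-- def searchDict(myDict, term):
--     findings = []
--     for key, value in myDict.items():
--         if term.lower() in value.lower():
--             findings.append(key)
--     return findings
--
-- def dataHasCovid(payload):
--     findings = []
--     for keyword in keywords:
--         query = searchDict(payload, keyword)
--         if query:
--             findings = findings + query
--     if findings:
--         return True
--     else:
--         return False
-- ===== SOURCE B (Python) =====
-- # B: one pass over the values with a precomputed minimal lowercase keyword set
-- # (keywords whose lowercase form contains another keyword are redundant for a
-- # substring test and are dropped), early-returning on the first hit.
-- _REDUCED = (
--     'covid',            # covers COVID-19, COVID19, COVID, covid-19, covid19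
--     'corona',           # covers coronavirus, corona virus
--     'sars-cov-2',
--     'sarscov2',
--     'sars cov 2',
--     'distancing',       # covers social distancing
--     'community spread',
--     'isolation',
--     'shelter',          # covers shelter at home / in place
--     'cdc',
--     'cdph',
--     'gatherings',
--     'public health emergency',
--     'stay home',
-- )
--
-- def dataHasCovid(payload):
--     for value in payload.values():
--         v = value.lower()
--         if any(k in v for k in _REDUCED):
--             return True
--     return False
-- ===== Notes on version B (the rewrite author's own statement) =====
-- stated objective: faster
-- what changed: Replaces the keyword-outer nested scan that builds a findings list over all 24 keywords with a single value-outer pass that early-returns on the first hit against a precomputed minimal set of 14 lowercase keywords (dropping keywords whose lowercase form already contains another keyword).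
import Mathlib
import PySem

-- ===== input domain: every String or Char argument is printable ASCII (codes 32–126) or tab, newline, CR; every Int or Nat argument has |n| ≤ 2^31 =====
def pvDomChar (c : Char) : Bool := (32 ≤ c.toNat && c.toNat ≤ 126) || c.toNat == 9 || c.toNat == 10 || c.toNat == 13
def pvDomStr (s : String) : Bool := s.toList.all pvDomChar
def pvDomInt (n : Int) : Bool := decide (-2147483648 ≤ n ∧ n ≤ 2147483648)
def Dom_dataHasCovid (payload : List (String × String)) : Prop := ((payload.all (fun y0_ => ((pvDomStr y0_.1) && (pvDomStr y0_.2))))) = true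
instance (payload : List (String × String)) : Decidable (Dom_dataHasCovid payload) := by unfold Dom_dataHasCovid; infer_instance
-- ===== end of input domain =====

-- B does one pass over the values with a precomputed minimal lowercase keyword
-- set and early exit, instead of A's keyword-outer nested scan building a list.

-- ===== PORT A =====
def pvKeywords : List String :=
  ["COVID-19", "COVID19", "COVID", "covid-19", "covid19", "covid",
   "coronavirus", "corona virus", "corona", "SARS-CoV-2", "SARSCov2",
   "SARS CoV 2", "social distancing", "distancing", "community spread",
   "isolation", "shelter at home", "shelter in place", "shelter", "CDC",
   "CDPH", "gatherings", "public health emergency", "stay home"]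

def searchDict (myDict : List (String × String)) (term : String) : List String :=
  myDict.foldl
    (fun findings kv =>
      if PySem.Str.isIn (PySem.Str.lower term) (PySem.Str.lower kv.2)
      then findings ++ [kv.1] else findings) []

def dataHasCovid (payload : List (String × String)) : Bool :=
  let findings :=
    pvKeywords.foldl
      (fun findings keyword =>
        let query := searchDict payload keyword
        if !query.isEmpty then findings ++ query else findings) []
  !findings.isEmpty

-- ===== PORT B =====
def pvReduced : List String :=
  ["covid", "corona", "sars-cov-2", "sarscov2", "sars cov 2", "distancing",
   "community spread", "isolation", "shelter", "cdc", "cdph", "gatherings",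
   "public health emergency", "stay home"]

def dataHasCovid_alt (payload : List (String × String)) : Bool :=
  payload.any (fun kv =>
    let v := PySem.Str.lower kv.2
    pvReduced.any (fun k => PySem.Str.isIn k v))

-- ===== PRECONDITION & SPEC =====
def Spec_dataHasCovid (payload : List (String × String)) (out : Bool) : Prop := out = dataHasCovid_alt payload
instance (payload : List (String × String)) (out : Bool) : Decidable (Spec_dataHasCovid payload out) := by unfold Spec_dataHasCovid; infer_instance

-- ===== CLAIM (what is proved, stated in full; the proofs are below) =====
def Claim_equal_dataHasCovid : Prop := ∀ (payload : List (String × String)), Dom_dataHasCovid payload → Spec_dataHasCovid payload (dataHasCovid payload)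

-- ===== LEMMAS AND PROOFS =====

-- searchDict is the filtered key list
theorem searchDict_eq (payload : List (String × String)) (term : String) :
    searchDict payload term
      = (payload.filter
          (fun kv => PySem.Str.isIn (PySem.Str.lower term) (PySem.Str.lower kv.2))).map (·.1) := by
  unfold searchDict
  rw [PySem.List.foldl_append_if]
  simp

-- A's outer loop appends possibly-empty blocks: drop the emptiness guard
theorem dataHasCovid_eq_flatMap (payload : List (String × String)) :
    dataHasCovid payload
      = !(pvKeywords.flatMap (fun kw => searchDict payload kw)).isEmpty := by
  unfold dataHasCovid
  have h : ∀ (acc : List String),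
      pvKeywords.foldl
        (fun findings keyword =>
          let query := searchDict payload keyword
          if !query.isEmpty then findings ++ query else findings) acc
        = acc ++ pvKeywords.flatMap (fun kw => searchDict payload kw) := by
    intro acc
    rw [← PySem.List.foldl_append_eq_flatMap]
    apply PySem.List.foldl_congr_mem
    intro b a _
    by_cases hq : (searchDict payload a).isEmpty
    · simp [List.isEmpty_iff.mp hq]
    · simp [hq]
  rw [h []]
  simp

theorem dataHasCovid_true_iff (payload : List (String × String)) :
    dataHasCovid payload = true
      ↔ ∃ kw ∈ pvKeywords, ∃ kv ∈ payload,
          PySem.Str.isIn (PySem.Str.lower kw) (PySem.Str.lower kv.2) = true := by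
  rw [dataHasCovid_eq_flatMap]
  simp only [Bool.not_eq_true', List.isEmpty_eq_false_iff_exists_mem]
  constructor
  · rintro ⟨x, hx⟩
    rw [List.mem_flatMap] at hx
    obtain ⟨kw, hkw, hx⟩ := hx
    rw [searchDict_eq] at hx
    simp only [List.mem_map, List.mem_filter] at hx
    obtain ⟨kv, ⟨hkv, hin⟩, _⟩ := hx
    exact ⟨kw, hkw, kv, hkv, hin⟩
  · rintro ⟨kw, hkw, kv, hkv, hin⟩
    refine ⟨kv.1, ?_⟩
    rw [List.mem_flatMap]
    refine ⟨kw, hkw, ?_⟩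
    rw [searchDict_eq]
    simp only [List.mem_map, List.mem_filter]
    exact ⟨kv, ⟨hkv, hin⟩, rfl⟩

theorem dataHasCovid_alt_true_iff (payload : List (String × String)) :
    dataHasCovid_alt payload = true
      ↔ ∃ kv ∈ payload, ∃ k ∈ pvReduced,
          PySem.Str.isIn k (PySem.Str.lower kv.2) = true := by
  unfold dataHasCovid_alt
  simp [List.any_eq_true]

-- every lowered full keyword contains some reduced keyword as a substring
theorem coverage :
    pvKeywords.all
      (fun kw => pvReduced.any (fun k => PySem.Str.isIn k (PySem.Str.lower kw))) = true := by
  decide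

-- every reduced keyword is the lowering of some full keyword
theorem reduced_sub :
    pvReduced.all (fun k => pvKeywords.any (fun kw => PySem.Str.lower kw == k)) = true := by
  decide

theorem main_iff (payload : List (String × String)) :
    dataHasCovid payload = dataHasCovid_alt payload := by
  rw [Bool.eq_iff_iff, dataHasCovid_true_iff, dataHasCovid_alt_true_iff]
  constructor
  · rintro ⟨kw, hkw, kv, hkv, hin⟩
    have hc := List.all_eq_true.mp coverage kw hkw
    obtain ⟨k, hk, hkin⟩ := List.any_eq_true.mp hc
    refine ⟨kv, hkv, k, hk, ?_⟩
    rw [PySem.Str.isIn_iff_infix] at hkin hin ⊢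
    exact hkin.trans hin
  · rintro ⟨kv, hkv, k, hk, hin⟩
    have hr := List.all_eq_true.mp reduced_sub k hk
    obtain ⟨kw, hkw, heq⟩ := List.any_eq_true.mp hr
    refine ⟨kw, hkw, kv, hkv, ?_⟩
    rw [eq_of_beq heq]
    exact hin

-- ===== VERDICT (by name: the statement is the Claim_ definition above) =====
theorem dataHasCovid_spec : Claim_equal_dataHasCovid := by
  intro payload _
  unfold Spec_dataHasCovid
  exact main_iff payload
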